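-- pv_equiv track=rewrite | github.com/fraugho/wordle-model | test/test.py | match_feedback
-- ===== SOURCE A (Python) =====
-- def match_feedback(word, guess, feedback):
--     word_chars = list(word)
--     guess_chars = list(guess)
--     feedback_copy = feedback.copy()
--     word_chars_copy = word_chars.copy()
--
--     # First pass for greens
--     for i in range(5):
--         if feedback[i] == 2:
--             if word_chars[i] != guess_chars[i]:
--                 return False
--             word_chars_copy[i] = None  # Mark as matched
--
--     # Second pass for yellows
--     for i in range(5):
--         if feedback[i] == 1:
--             if guess_chars[i] == word_chars[i]:
--                 return False  # Should not be in the same position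
--             elif guess_chars[i] not in word_chars_copy:
--                 return False  # Letter not in word
--             else:
--                 idx = word_chars_copy.index(guess_chars[i])
--                 word_chars_copy[idx] = None  # Mark as matched
--
--     # Third pass for grays
--     for i in range(5):
--         if feedback[i] == 0:
--             if guess_chars[i] in word_chars_copy:
--                 return False  # Letter should not be in word
--     return True
-- ===== SOURCE B (Python) =====
-- def match_feedback(word, guess, feedback):
--     # Positional checks: each green must match its cell exactly,
--     # and no yellow may sit in its own cell.
--     for i in range(5):
--         if feedback[i] == 2 and word[i] != guess[i]:
--             return False
--     for i in range(5):
--         if feedback[i] == 1 and guess[i] == word[i]: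
--             return False
--     # Per-letter count arithmetic replaces A's simulated consumption of a
--     # marker list: collect the letters each feedback class demands ...
--     greens = [guess[i] for i in range(5) if feedback[i] == 2]
--     yellows = [guess[i] for i in range(5) if feedback[i] == 1]
--     grays = [guess[i] for i in range(5) if feedback[i] == 0]
--     # ... then check pure counting inequalities per letter:
--     # yellows of c fit in the copies of c not used by greens,
--     for c in set(yellows):
--         if yellows.count(c) > word.count(c) - greens.count(c):
--             return False
--     # and a gray c means every copy of c in the word is accounted for.
--     for c in grays:
--         if word.count(c) > greens.count(c) + yellows.count(c):
--             return False
--     return True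
-- ===== Notes on version B (the rewrite author's own statement) =====
-- stated objective: simpler
-- what changed: B drops A's simulated consumption of a None-marked word-letter list (membership tests plus list.index mutation) entirely: it does two positional validity checks, then collects the green/yellow/gray guess letters per feedback class and decides by pure per-letter counting inequalities (yellows.count(c) <= word.count(c) - greens.count(c); gray c needs word.count(c) <= greens.count(c) + yellows.count(c)).
-- outside the precondition, e.g. on match_feedback('abc', 'zzzzz', [1, 0, 0, 0, 1]): A returns False, B raises IndexError; on match_feedback('ccbccca', 'c', [1, 0, 0, 1, 1, 0]): A returns False, B returns False
import Mathlib
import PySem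

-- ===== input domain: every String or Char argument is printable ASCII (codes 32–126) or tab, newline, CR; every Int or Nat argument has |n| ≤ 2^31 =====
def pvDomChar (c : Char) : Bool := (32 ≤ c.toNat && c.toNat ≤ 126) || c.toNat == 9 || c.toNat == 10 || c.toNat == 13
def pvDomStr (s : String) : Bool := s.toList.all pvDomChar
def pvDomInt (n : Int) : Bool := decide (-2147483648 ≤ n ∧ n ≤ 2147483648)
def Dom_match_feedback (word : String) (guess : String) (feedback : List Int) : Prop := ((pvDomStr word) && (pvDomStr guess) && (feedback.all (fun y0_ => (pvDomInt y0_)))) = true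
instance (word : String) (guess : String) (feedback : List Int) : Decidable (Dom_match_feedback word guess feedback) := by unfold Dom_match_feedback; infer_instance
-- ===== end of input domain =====

-- B replaces A's simulated consumption of a None-marked word-letter list by two positional
-- checks plus per-letter counting inequalities over the green/yellow/gray guess letters.


-- ===== PORT A =====
-- A keeps a copy of the word's letters and overwrites matched positions with None.
-- `for i in range(5)` is ported as structural recursion over the literal index list
-- [0,1,2,3,4] (exact for range(5)); list indexing `xs[i]` uses List.getD, exact for the
-- in-range indices Pre_ guarantees (all indices read are in range there).
def mfA_greens (wc gc : List Char) (fb : List Int) : List Nat → List (Option Char) → Option (List (Option Char))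
  | [], wcc => some wcc
  | i :: rest, wcc =>
    if fb.getD i 0 = 2 then
      if wc.getD i ' ' ≠ gc.getD i ' ' then none
      else mfA_greens wc gc fb rest (wcc.set i none)
    else mfA_greens wc gc fb rest wcc

def mfA_yellows (wc gc : List Char) (fb : List Int) : List Nat → List (Option Char) → Option (List (Option Char))
  | [], wcc => some wcc
  | i :: rest, wcc =>
    if fb.getD i 0 = 1 then
      if gc.getD i ' ' = wc.getD i ' ' then none
      else if some (gc.getD i ' ') ∉ wcc then none
      else
        -- idx = word_chars_copy.index(guess_chars[i]); word_chars_copy[idx] = None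
        match List.idxOf? (some (gc.getD i ' ')) wcc with
        | some idx => mfA_yellows wc gc fb rest (wcc.set idx none)
        | none => none   -- unreachable: membership was just checked
    else mfA_yellows wc gc fb rest wcc

def mfA_grays (gc : List Char) (fb : List Int) : List Nat → List (Option Char) → Bool
  | [], _ => true
  | i :: rest, wcc =>
    if fb.getD i 0 = 0 ∧ some (gc.getD i ' ') ∈ wcc then false
    else mfA_grays gc fb rest wcc

def match_feedback (word : String) (guess : String) (feedback : List Int) : Bool :=
  let wc := word.toList
  let gc := guess.toList
  match mfA_greens wc gc feedback [0, 1, 2, 3, 4] (wc.map some) with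
  | none => false
  | some wcc1 =>
    match mfA_yellows wc gc feedback [0, 1, 2, 3, 4] wcc1 with
    | none => false
    | some wcc2 => mfA_grays gc feedback [0, 1, 2, 3, 4] wcc2

-- ===== PORT B =====
-- B: positional validity loops, then letter lists per feedback class and pure
-- count inequalities (no consumption state).  `for c in X: if cond: return False`
-- is ported as X.all (not cond); set(yellows) is PySem.Set.ofList.
def mfB_chkGreens (wc gc : List Char) (fb : List Int) : List Nat → Bool
  | [] => true
  | i :: rest =>
    if fb.getD i 0 = 2 ∧ wc.getD i ' ' ≠ gc.getD i ' ' then false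
    else mfB_chkGreens wc gc fb rest

def mfB_chkYellowPos (wc gc : List Char) (fb : List Int) : List Nat → Bool
  | [] => true
  | i :: rest =>
    if fb.getD i 0 = 1 ∧ gc.getD i ' ' = wc.getD i ' ' then false
    else mfB_chkYellowPos wc gc fb rest

-- [guess[i] for i in range(5) if feedback[i] == f]
def mfB_letters (gc : List Char) (fb : List Int) (f : Int) : List Char :=
  (([0, 1, 2, 3, 4] : List Nat).filter (fun i => fb.getD i 0 == f)).map (fun i => gc.getD i ' ')

def match_feedback_alt (word : String) (guess : String) (feedback : List Int) : Bool :=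
  let wc := word.toList
  let gc := guess.toList
  if mfB_chkGreens wc gc feedback [0, 1, 2, 3, 4] then
    if mfB_chkYellowPos wc gc feedback [0, 1, 2, 3, 4] then
      let greens := mfB_letters gc feedback 2
      let yellows := mfB_letters gc feedback 1
      let grays := mfB_letters gc feedback 0
      (PySem.Set.ofList yellows).all
          (fun c => !decide ((yellows.count c : Int) > (wc.count c : Int) - (greens.count c : Int))) &&
        grays.all
          (fun c => !decide ((wc.count c : Int) > (greens.count c : Int) + (yellows.count c : Int)))
    else false
  else false

-- ===== PRECONDITION & SPEC =====
-- Pre_ = exactly the inputs on which no pass reads past the end of word/guess/feedback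
-- (first disjunct), plus those where the green pass returns False at an index i before any
-- out-of-range read (second disjunct). Excluded (A raises IndexError there) are all other
-- short inputs — except a few state-dependent ones where a yellow/gray check of A returns
-- False before the out-of-range read is reached (B raises IndexError on some of those and
-- returns the same False on others; see the cites).
def Pre_match_feedback (word : String) (guess : String) (feedback : List Int) : Prop :=
  (5 ≤ feedback.length ∧
    (∀ j < 5, (feedback.getD j 0 = 1 ∨ feedback.getD j 0 = 2) →
        (j < word.toList.length ∧ j < guess.toList.length)) ∧
    (∀ j < 5, feedback.getD j 0 = 0 → j < guess.toList.length)) ∨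
  (∃ i < 5, i < feedback.length ∧ i < word.toList.length ∧ i < guess.toList.length ∧
    feedback.getD i 0 = 2 ∧ word.toList.getD i ' ' ≠ guess.toList.getD i ' ' ∧
    ∀ j < i, feedback.getD j 0 = 2 → (j < word.toList.length ∧ j < guess.toList.length))
instance (word : String) (guess : String) (feedback : List Int) : Decidable (Pre_match_feedback word guess feedback) := by unfold Pre_match_feedback; infer_instance

def pvWitness_match_feedback : String × String × List Int := ("crane", "slate", [0, 0, 2, 0, 2])

def Spec_match_feedback (word : String) (guess : String) (feedback : List Int) (out : Bool) : Prop := out = match_feedback_alt word guess feedback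
instance (word : String) (guess : String) (feedback : List Int) (out : Bool) : Decidable (Spec_match_feedback word guess feedback out) := by unfold Spec_match_feedback; infer_instance

-- ===== CLAIM (what is proved, stated in full; the proofs are below) =====
def Claim_equal_match_feedback : Prop := ∀ (word : String) (guess : String) (feedback : List Int), Dom_match_feedback word guess feedback → Pre_match_feedback word guess feedback → Spec_match_feedback word guess feedback (match_feedback word guess feedback)

-- ===== LEMMAS AND PROOFS =====

-- Setting an index that holds `some c` to `none` lowers the count of `some c` by one.
lemma mf_count_set_none (l : List (Option Char)) (i : Nat) (c : Char)
    (h : l[i]? = some (some c)) (y : Char) :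
    ((l.set i none).count (some y) : Int)
      = (l.count (some y) : Int) - (if y = c then 1 else 0) := by
  obtain ⟨hi, hv⟩ := List.getElem?_eq_some_iff.mp h
  have hset : l.set i none = l.take i ++ none :: l.drop (i + 1) :=
    List.set_eq_take_cons_drop none hi
  have hsplit : l = l.take i ++ l[i] :: l.drop (i + 1) := by
    conv_lhs => rw [← List.take_append_drop i l, ← List.getElem_cons_drop hi]
  rw [hset]
  conv_rhs => rw [hsplit]
  rw [List.count_append, List.count_append, List.count_cons, List.count_cons, hv]
  by_cases hy : y = c
  · subst hy; simp; omega
  · have h1 : ¬ c = y := fun e => hy e.symm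
    simp [hy, h1]

-- A's green pass fails exactly on a feedback-2 mismatch (independently of the marker list).
lemma mfA_greens_eq_none_iff (wc gc : List Char) (fb : List Int) :
    ∀ (idxs : List Nat) (wcc : List (Option Char)),
      mfA_greens wc gc fb idxs wcc = none
        ↔ ∃ i ∈ idxs, fb.getD i 0 = 2 ∧ wc.getD i ' ' ≠ gc.getD i ' ' := by
  intro idxs
  induction idxs with
  | nil => simp [mfA_greens]
  | cons i rest ih =>
    intro wcc
    simp only [mfA_greens]
    by_cases h2 : fb.getD i 0 = 2
    · by_cases hne : wc.getD i ' ' ≠ gc.getD i ' '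
      · rw [if_pos h2, if_pos hne]
        exact iff_of_true rfl ⟨i, List.mem_cons_self .., h2, hne⟩
      · rw [if_pos h2, if_neg hne, ih]
        constructor
        · rintro ⟨j, hj, hp⟩; exact ⟨j, List.mem_cons_of_mem _ hj, hp⟩
        · rintro ⟨j, hj, hp⟩
          rcases List.mem_cons.mp hj with rfl | hjr
          · exact absurd hp.2 hne
          · exact ⟨j, hjr, hp⟩
    · rw [if_neg h2, ih]
      constructor
      · rintro ⟨j, hj, hp⟩; exact ⟨j, List.mem_cons_of_mem _ hj, hp⟩
      · rintro ⟨j, hj, hp⟩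
        rcases List.mem_cons.mp hj with rfl | hjr
        · exact absurd hp.1 h2
        · exact ⟨j, hjr, hp⟩

-- When A's green pass succeeds, it removes exactly the green letters from the marker list.
lemma mfA_greens_count (wc gc : List Char) (fb : List Int) :
    ∀ (idxs : List Nat) (wcc : List (Option Char)) (w' : List (Option Char)),
      idxs.Nodup →
      (∀ j ∈ idxs, fb.getD j 0 = 2 → wcc[j]? = some (some (wc.getD j ' '))) →
      mfA_greens wc gc fb idxs wcc = some w' →
      ∀ c, (w'.count (some c) : Int)
            + ((idxs.filter (fun i => fb.getD i 0 == 2)).map (fun i => gc.getD i ' ')).count c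
          = wcc.count (some c) := by
  intro idxs
  induction idxs with
  | nil => intro wcc w' _ _ h c; simp only [mfA_greens, Option.some.injEq] at h; simp [h]
  | cons i rest ih =>
    intro wcc w' hnd hpos h c
    obtain ⟨hir, hndr⟩ := List.nodup_cons.mp hnd
    simp only [mfA_greens] at h
    by_cases h2 : fb.getD i 0 = 2
    · rw [if_pos h2] at h
      by_cases hne : wc.getD i ' ' ≠ gc.getD i ' '
      · rw [if_pos hne] at h; exact absurd h (by simp)
      · rw [if_neg hne] at h
        rw [not_ne_iff] at hne
        have hget : wcc[i]? = some (some (wc.getD i ' ')) := hpos i (List.mem_cons_self ..) h2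
        have hpos' : ∀ j ∈ rest, fb.getD j 0 = 2 → (wcc.set i none)[j]? = some (some (wc.getD j ' ')) := by
          intro j hj hj2
          rw [List.getElem?_set_ne (by intro e; exact hir (e ▸ hj))]
          exact hpos j (List.mem_cons_of_mem _ hj) hj2
        have hrec := ih (wcc.set i none) w' hndr hpos' h c
        have hset := mf_count_set_none wcc i (wc.getD i ' ') hget c
        have hb2 : (fb.getD i 0 == 2) = true := beq_iff_eq.mpr h2
        rw [List.filter_cons, if_pos hb2, List.map_cons, List.count_cons]
        by_cases hc : c = gc.getD i ' '
        · rw [if_pos (hc.trans hne.symm)] at hset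
          rw [beq_iff_eq.mpr hc.symm, if_pos rfl]
          push_cast
          omega
        · rw [if_neg (fun e => hc (e.trans hne))] at hset
          rw [beq_eq_false_iff_ne.mpr (fun e => hc e.symm), if_neg Bool.false_ne_true]
          push_cast
          omega
    · rw [if_neg h2] at h
      have hb2 : ¬ ((fb.getD i 0 == 2) = true) := by
        intro hb; exact h2 (beq_iff_eq.mp hb)
      rw [List.filter_cons, if_neg hb2]
      exact ih wcc w' hndr (fun j hj => hpos j (List.mem_cons_of_mem _ hj)) h c

-- A's yellow pass: it succeeds iff no yellow sits at its own cell and, per letter,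
-- the yellows fit into the remaining marker list; on success it removes exactly them.
lemma mfA_yellows_char (wc gc : List Char) (fb : List Int) :
    ∀ (idxs : List Nat) (wcc : List (Option Char)),
      ((mfA_yellows wc gc fb idxs wcc).isSome
        ↔ ((∀ i ∈ idxs, fb.getD i 0 = 1 → gc.getD i ' ' ≠ wc.getD i ' ') ∧
           (∀ c, (((idxs.filter (fun i => fb.getD i 0 == 1)).map (fun i => gc.getD i ' ')).count c : Int)
                  ≤ wcc.count (some c))))
      ∧ (∀ w', mfA_yellows wc gc fb idxs wcc = some w' →
          ∀ c, (wcc.count (some c) : Int)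
              = w'.count (some c)
                + ((idxs.filter (fun i => fb.getD i 0 == 1)).map (fun i => gc.getD i ' ')).count c) := by
  intro idxs
  induction idxs with
  | nil =>
    intro wcc
    constructor
    · simp [mfA_yellows]
    · intro w' h c; simp only [mfA_yellows, Option.some.injEq] at h; simp [h]
  | cons i rest ih =>
    intro wcc
    by_cases h1 : fb.getD i 0 = 1
    · have hb1 : (fb.getD i 0 == 1) = true := beq_iff_eq.mpr h1
      have hfil : (i :: rest).filter (fun i => fb.getD i 0 == 1)
          = i :: rest.filter (fun i => fb.getD i 0 == 1) := by
        rw [List.filter_cons, if_pos hb1]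
      by_cases hp : gc.getD i ' ' = wc.getD i ' '
      · constructor
        · simp only [mfA_yellows, if_pos h1, if_pos hp]
          simp only [Option.isSome_none, Bool.false_eq_true, false_iff]
          intro ⟨hposi, _⟩
          exact hposi i (List.mem_cons_self ..) h1 hp
        · intro w' h
          simp only [mfA_yellows, if_pos h1, if_pos hp] at h
          exact absurd h (by simp)
      · by_cases hm : some (gc.getD i ' ') ∈ wcc
        · have hcount : 0 < wcc.count (some (gc.getD i ' ')) := List.count_pos_iff.mpr hm
          obtain ⟨idx, hidx⟩ := Option.isSome_iff_exists.mp (List.isSome_idxOf?.mpr hm)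
          obtain ⟨hlt, hat, -⟩ := List.idxOf?_eq_some_iff.mp hidx
          have hget : wcc[idx]? = some (some (gc.getD i ' ')) := by
            rw [List.getElem?_eq_getElem hlt, hat]
          have hset := fun c => mf_count_set_none wcc idx (gc.getD i ' ') hget c
          have heq : mfA_yellows wc gc fb (i :: rest) wcc
              = mfA_yellows wc gc fb rest (wcc.set idx none) := by
            simp only [mfA_yellows, if_pos h1, if_neg hp, if_neg (not_not_intro hm), hidx]
          obtain ⟨ihS, ihC⟩ := ih (wcc.set idx none)
          -- count bookkeeping for one letter
          have hstep : ∀ c,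
              ((((i :: rest).filter (fun i => fb.getD i 0 == 1)).map (fun i => gc.getD i ' ')).count c : Int)
                = ((rest.filter (fun i => fb.getD i 0 == 1)).map (fun i => gc.getD i ' ')).count c
                  + (if c = gc.getD i ' ' then 1 else 0) := by
            intro c
            rw [hfil, List.map_cons, List.count_cons]
            by_cases hc : c = gc.getD i ' '
            · rw [beq_iff_eq.mpr hc.symm, if_pos rfl, if_pos hc]; push_cast; ring
            · rw [beq_eq_false_iff_ne.mpr (fun e => hc e.symm), if_neg Bool.false_ne_true, if_neg hc]; push_cast; ring
          have hsetc : ∀ c, ((wcc.set idx none).count (some c) : Int)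
              = wcc.count (some c) - (if c = gc.getD i ' ' then 1 else 0) := hset
          constructor
          · rw [heq, ihS]
            constructor
            · rintro ⟨hposr, hcnt⟩
              refine ⟨?_, ?_⟩
              · intro j hj
                rcases List.mem_cons.mp hj with rfl | hjr
                · intro _; exact hp
                · exact hposr j hjr
              · intro c
                have hcntc := hcnt c
                have := hsetc c
                rw [hstep c]
                by_cases hc : c = gc.getD i ' '
                · rw [if_pos hc] at *
                  have hcc : (1 : Int) ≤ wcc.count (some c) := by
                    rw [hc]; exact_mod_cast hcount
                  omega
                · rw [if_neg hc] at *
                  omega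
            · rintro ⟨hposr, hcnt⟩
              refine ⟨fun j hj => hposr j (List.mem_cons_of_mem _ hj), ?_⟩
              intro c
              have hcntc := hcnt c
              have := hsetc c
              rw [hstep c] at hcntc
              by_cases hc : c = gc.getD i ' '
              · rw [if_pos hc] at *; omega
              · rw [if_neg hc] at *; omega
          · intro w' h c
            rw [heq] at h
            have := ihC w' h c
            have := hsetc c
            rw [hstep c]
            omega
        · have hc0 : wcc.count (some (gc.getD i ' ')) = 0 := List.count_eq_zero.mpr hm
          have heq : mfA_yellows wc gc fb (i :: rest) wcc = none := by
            simp only [mfA_yellows, if_pos h1, if_neg hp, if_pos hm]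
          constructor
          · rw [heq]
            simp only [Option.isSome_none, Bool.false_eq_true, false_iff]
            rintro ⟨-, hcnt⟩
            have := hcnt (gc.getD i ' ')
            rw [hfil, List.map_cons, List.count_cons, hc0] at this
            rw [BEq.rfl, if_pos rfl] at this
            push_cast at this
            omega
          · intro w' h; rw [heq] at h; exact absurd h (by simp)
    · have hfil : (i :: rest).filter (fun i => fb.getD i 0 == 1)
          = rest.filter (fun i => fb.getD i 0 == 1) := by
        rw [List.filter_cons, if_neg (fun hb => h1 (beq_iff_eq.mp hb))]
      have heq : mfA_yellows wc gc fb (i :: rest) wcc = mfA_yellows wc gc fb rest wcc := by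
        simp only [mfA_yellows, if_neg h1]
      obtain ⟨ihS, ihC⟩ := ih wcc
      constructor
      · rw [heq, ihS, hfil]
        constructor
        · rintro ⟨hposr, hcnt⟩
          exact ⟨fun j hj => by
            rcases List.mem_cons.mp hj with rfl | hjr
            · intro e; exact absurd e h1
            · exact hposr j hjr, hcnt⟩
        · rintro ⟨hposr, hcnt⟩
          exact ⟨fun j hj => hposr j (List.mem_cons_of_mem _ hj), hcnt⟩
      · intro w' h c; rw [heq] at h; rw [hfil]; exact ihC w' h c

-- A's gray pass is true iff no gray letter is still present in the marker list.
lemma mfA_grays_iff (gc : List Char) (fb : List Int) :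
    ∀ (idxs : List Nat) (wcc : List (Option Char)),
      mfA_grays gc fb idxs wcc = true
        ↔ ∀ i ∈ idxs, ¬ (fb.getD i 0 = 0 ∧ some (gc.getD i ' ') ∈ wcc) := by
  intro idxs
  induction idxs with
  | nil => simp [mfA_grays]
  | cons i rest ih =>
    intro wcc
    simp only [mfA_grays]
    by_cases h : fb.getD i 0 = 0 ∧ some (gc.getD i ' ') ∈ wcc
    · rw [if_pos h]
      exact iff_of_false (by simp) (fun hall => hall i (List.mem_cons_self ..) h)
    · rw [if_neg h, ih]
      constructor
      · intro hall j hj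
        rcases List.mem_cons.mp hj with rfl | hjr
        · exact h
        · exact hall j hjr
      · intro hall j hj; exact hall j (List.mem_cons_of_mem _ hj)

-- B's positional loops, characterised.
lemma mfB_chkGreens_iff (wc gc : List Char) (fb : List Int) :
    ∀ idxs : List Nat,
      mfB_chkGreens wc gc fb idxs = true
        ↔ ∀ i ∈ idxs, ¬ (fb.getD i 0 = 2 ∧ wc.getD i ' ' ≠ gc.getD i ' ') := by
  intro idxs
  induction idxs with
  | nil => simp [mfB_chkGreens]
  | cons i rest ih =>
    simp only [mfB_chkGreens]
    by_cases h : fb.getD i 0 = 2 ∧ wc.getD i ' ' ≠ gc.getD i ' '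
    · rw [if_pos h]
      exact iff_of_false (by simp) (fun hall => hall i (List.mem_cons_self ..) h)
    · rw [if_neg h, ih]
      constructor
      · intro hall j hj
        rcases List.mem_cons.mp hj with rfl | hjr
        · exact h
        · exact hall j hjr
      · intro hall j hj; exact hall j (List.mem_cons_of_mem _ hj)

lemma mfB_chkYellowPos_iff (wc gc : List Char) (fb : List Int) :
    ∀ idxs : List Nat,
      mfB_chkYellowPos wc gc fb idxs = true
        ↔ ∀ i ∈ idxs, ¬ (fb.getD i 0 = 1 ∧ gc.getD i ' ' = wc.getD i ' ') := by
  intro idxs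
  induction idxs with
  | nil => simp [mfB_chkYellowPos]
  | cons i rest ih =>
    simp only [mfB_chkYellowPos]
    by_cases h : fb.getD i 0 = 1 ∧ gc.getD i ' ' = wc.getD i ' '
    · rw [if_pos h]
      exact iff_of_false (by simp) (fun hall => hall i (List.mem_cons_self ..) h)
    · rw [if_neg h, ih]
      constructor
      · intro hall j hj
        rcases List.mem_cons.mp hj with rfl | hjr
        · exact h
        · exact hall j hjr
      · intro hall j hj; exact hall j (List.mem_cons_of_mem _ hj)

lemma mf_count_map_some (wc : List Char) (c : Char) :
    (wc.map some).count (some c) = wc.count c := by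
  rw [List.count_map_of_injective _ some (fun a b => Option.some.inj) c]

-- ===== VERDICT (by name: the statement is the Claim_ definition above) =====
theorem match_feedback_spec : Claim_equal_match_feedback := by
  intro word guess feedback _ hpre
  unfold Spec_match_feedback
  simp only [match_feedback, match_feedback_alt]
  set wc := word.toList with hwc
  set gc := guess.toList with hgc
  rcases hpre with ⟨hlen, hw, hg0⟩ | ⟨i, hi5, -, hiw, hig, h2, hne, -⟩
  case inr =>
    -- a green mismatch: both sides return false
    have hmem : i ∈ ([0, 1, 2, 3, 4] : List Nat) := by simp; omega
    have hA : mfA_greens wc gc feedback [0, 1, 2, 3, 4] (wc.map some) = none :=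
      (mfA_greens_eq_none_iff wc gc feedback _ _).mpr ⟨i, hmem, h2, hne⟩
    have hB : mfB_chkGreens wc gc feedback [0, 1, 2, 3, 4] = false := by
      rw [← Bool.not_eq_true, mfB_chkGreens_iff]
      push_neg
      exact ⟨i, hmem, h2, hne⟩
    simp [hA, hB]
  -- main case: all reads in range
  have hpos : ∀ j ∈ ([0, 1, 2, 3, 4] : List Nat), feedback.getD j 0 = 2 →
      (wc.map some)[j]? = some (some (wc.getD j ' ')) := by
    intro j hj hj2
    have hjlen : j < wc.length := by
      have hj5 : j < 5 := by fin_cases hj <;> omega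
      exact (hw j hj5 (Or.inr hj2)).1
    rw [List.getElem?_map, List.getElem?_eq_getElem hjlen, List.getD_eq_getElem _ _ hjlen]
    rfl
  cases hAg : mfA_greens wc gc feedback [0, 1, 2, 3, 4] (wc.map some) with
  | none =>
    obtain ⟨i, hmem, h2, hne⟩ := (mfA_greens_eq_none_iff wc gc feedback _ _).mp hAg
    have hB : mfB_chkGreens wc gc feedback [0, 1, 2, 3, 4] = false := by
      rw [← Bool.not_eq_true, mfB_chkGreens_iff]
      push_neg
      exact ⟨i, hmem, h2, hne⟩
    simp [hB]
  | some w1 =>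
    have hBg : mfB_chkGreens wc gc feedback [0, 1, 2, 3, 4] = true := by
      rw [mfB_chkGreens_iff]
      intro i hi ⟨h2, hne⟩
      have : mfA_greens wc gc feedback [0, 1, 2, 3, 4] (wc.map some) = none :=
        (mfA_greens_eq_none_iff wc gc feedback _ _).mpr ⟨i, hi, h2, hne⟩
      rw [hAg] at this; exact absurd this (by simp)
    have hgcount := mfA_greens_count wc gc feedback [0, 1, 2, 3, 4] (wc.map some) w1
      (by decide) hpos hAg
    rw [show (([0,1,2,3,4] : List Nat).filter (fun i => feedback.getD i 0 == 2)).map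
        (fun i => gc.getD i ' ') = mfB_letters gc feedback 2 from rfl] at hgcount
    have hw1 : ∀ c, (w1.count (some c) : Int)
        = (wc.count c : Int) - ((mfB_letters gc feedback 2).count c : Int) := by
      intro c
      have := hgcount c
      rw [mf_count_map_some] at this
      omega
    obtain ⟨hYsome, hYcount⟩ := mfA_yellows_char wc gc feedback [0, 1, 2, 3, 4] w1
    rw [show (([0,1,2,3,4] : List Nat).filter (fun i => feedback.getD i 0 == 1)).map
        (fun i => gc.getD i ' ') = mfB_letters gc feedback 1 from rfl] at hYsome
    cases hAy : mfA_yellows wc gc feedback [0, 1, 2, 3, 4] w1 with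
    | none =>
      -- A returns false; show B returns false too
      have hnot : ¬ ((∀ i ∈ ([0,1,2,3,4] : List Nat), feedback.getD i 0 = 1 →
            gc.getD i ' ' ≠ wc.getD i ' ') ∧
          (∀ c, (((mfB_letters gc feedback 1).count c : Int)) ≤ w1.count (some c))) := by
        rw [← hYsome, hAy]; simp
      rw [hBg, if_pos rfl]
      by_cases hposY : ∀ i ∈ ([0,1,2,3,4] : List Nat), feedback.getD i 0 = 1 →
          gc.getD i ' ' ≠ wc.getD i ' '
      · -- the per-letter count fails for some c
        have hcnt : ∃ c, ¬ (((mfB_letters gc feedback 1).count c : Int) ≤ w1.count (some c)) := by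
          by_contra hall
          push_neg at hall
          exact hnot ⟨hposY, fun c => hall c⟩
        obtain ⟨c, hc⟩ := hcnt
        push_neg at hc
        have hcpos : 0 < (mfB_letters gc feedback 1).count c := by
          by_contra h0
          have hz : (mfB_letters gc feedback 1).count c = 0 := by omega
          rw [hz] at hc
          have := hw1 c
          simp at hc
          omega
        have hcmem : c ∈ mfB_letters gc feedback 1 := List.count_pos_iff.mp hcpos
        have hYB : mfB_chkYellowPos wc gc feedback [0, 1, 2, 3, 4] = true := by
          rw [mfB_chkYellowPos_iff]
          intro i hi ⟨h1, hp⟩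
          exact hposY i hi h1 hp
        rw [hYB, if_pos rfl]
        have hallfalse : ((PySem.Set.ofList (mfB_letters gc feedback 1)).all
            (fun c => !decide (((mfB_letters gc feedback 1).count c : Int) >
              (wc.count c : Int) - ((mfB_letters gc feedback 2).count c : Int)))) = false := by
          rw [← Bool.not_eq_true, List.all_eq_true]
          intro hall
          have := hall c ((PySem.Set.mem_ofList _ _).mpr hcmem)
          rw [hw1 c] at hc
          simp at this
          omega
        simp only [hAy, hallfalse, Bool.false_and]
      · -- a yellow at its own cell: B's positional yellow check fails
        have hYB : mfB_chkYellowPos wc gc feedback [0, 1, 2, 3, 4] = false := by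
          rw [← Bool.not_eq_true, mfB_chkYellowPos_iff]
          push_neg at hposY ⊢
          obtain ⟨i, hi, h1, hp⟩ := hposY
          exact ⟨i, hi, h1, hp⟩
        simp [hAy, hYB]
    | some w2 =>
      -- both yellow conditions hold; compare the gray stage
      obtain ⟨hposY, hcntY⟩ := hYsome.mp (by rw [hAy]; rfl)
      have hYB : mfB_chkYellowPos wc gc feedback [0, 1, 2, 3, 4] = true := by
        rw [mfB_chkYellowPos_iff]
        intro i hi ⟨h1, hp⟩
        exact hposY i hi h1 hp
      have hw2 : ∀ c, (w2.count (some c) : Int)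
          = (wc.count c : Int) - ((mfB_letters gc feedback 2).count c : Int)
            - ((mfB_letters gc feedback 1).count c : Int) := by
        intro c
        have h := hYcount w2 hAy c
        rw [show (([0,1,2,3,4] : List Nat).filter (fun i => feedback.getD i 0 == 1)).map
            (fun i => gc.getD i ' ') = mfB_letters gc feedback 1 from rfl] at h
        have := hw1 c
        omega
      have hallY : ((PySem.Set.ofList (mfB_letters gc feedback 1)).all
          (fun c => !decide (((mfB_letters gc feedback 1).count c : Int) >
            (wc.count c : Int) - ((mfB_letters gc feedback 2).count c : Int)))) = true := by
        rw [List.all_eq_true]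
        intro c _
        have h := hcntY c
        have := hw1 c
        rw [Bool.not_eq_true', decide_eq_false_iff_not]
        omega
      simp only [hAy, hBg, hYB, hallY, eq_self_iff_true, if_true, Bool.true_and]
      -- gray stage: A's membership test vs B's counting inequality
      rw [Bool.eq_iff_iff, mfA_grays_iff, List.all_eq_true]
      constructor
      · intro hA c hcmem
        obtain ⟨i, hif, hic⟩ := List.mem_map.mp hcmem
        obtain ⟨hii, hif0⟩ := List.mem_filter.mp hif
        have hif0' : feedback.getD i 0 = 0 := by simpa using hif0
        have hnm : some (gc.getD i ' ') ∉ w2 := fun hmem => hA i hii ⟨hif0', hmem⟩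
        have hz : w2.count (some c) = 0 := by
          rw [← hic]; exact List.count_eq_zero.mpr hnm
        have h2 := hw2 c
        rw [hz] at h2
        rw [Bool.not_eq_true', decide_eq_false_iff_not]
        simp only [Int.natCast_zero] at h2
        omega
      · intro hB i hii ⟨hif0, hmem⟩
        have hcmem : gc.getD i ' ' ∈ mfB_letters gc feedback 0 := by
          unfold mfB_letters
          exact List.mem_map.mpr ⟨i, List.mem_filter.mpr ⟨hii, by simpa using hif0⟩, rfl⟩
        have hBc := hB _ hcmem
        rw [Bool.not_eq_true', decide_eq_false_iff_not] at hBc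
        have hcp : 0 < w2.count (some (gc.getD i ' ')) := List.count_pos_iff.mpr hmem
        have := hw2 (gc.getD i ' ')
        omega
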